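-- pv_equiv track=rewrite | github.com/RaspberryEmma/Mixed-Integer-Linear-Programming | all_possible_cons.py | find_all_threes
-- ===== SOURCE A (Python) =====
-- def find_all_threes(pairs, data):
--     all_threes = []
--     current    = {}
--
--     for pair_1 in pairs:
--         for pair_2 in pairs:
--             current = pair_1.union(pair_2)
--
--             # only accept a new constituency if we have 2 arcs between 3 shires
--             # pairs of the same are rejected as union will have 2 elements
--             # non-adjacent pairs also rejected as union will have 4 elements
--             if (len(current) == 3):
--                 all_threes.append(current)
--
--     return (all_threes)
-- ===== SOURCE B (Python) =====
-- def find_all_threes(pairs, data):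
--     n = len(pairs)
--     # bucket: element -> list of indices of pair-sets containing it
--     bucket = {}
--     for i, p in enumerate(pairs):
--         for x in p:
--             bucket.setdefault(x, []).append(i)
--     all_threes = []
--     for i in range(n):
--         p = pairs[i]
--         # row[j] = |pairs[i] & pairs[j]|, computed from the buckets of p's elements
--         row = {}
--         for x in p:
--             for j in bucket.get(x, []):
--                 row[j] = row.get(j, 0) + 1
--         for j in range(n):
--             if len(p) + len(pairs[j]) - row.get(j, 0) == 3:
--                 all_threes.append(p | pairs[j])
--     return all_threes
-- ===== Notes on version B (the rewrite author's own statement) =====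
-- stated objective: faster
-- what changed: B precomputes an element-to-pair-indices bucket index and per-pair intersection counters, deciding the size-3 test by integer arithmetic and building a union set only for qualifying pairs, instead of A's recomputation of the full set union for every ordered pair.
import Mathlib
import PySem

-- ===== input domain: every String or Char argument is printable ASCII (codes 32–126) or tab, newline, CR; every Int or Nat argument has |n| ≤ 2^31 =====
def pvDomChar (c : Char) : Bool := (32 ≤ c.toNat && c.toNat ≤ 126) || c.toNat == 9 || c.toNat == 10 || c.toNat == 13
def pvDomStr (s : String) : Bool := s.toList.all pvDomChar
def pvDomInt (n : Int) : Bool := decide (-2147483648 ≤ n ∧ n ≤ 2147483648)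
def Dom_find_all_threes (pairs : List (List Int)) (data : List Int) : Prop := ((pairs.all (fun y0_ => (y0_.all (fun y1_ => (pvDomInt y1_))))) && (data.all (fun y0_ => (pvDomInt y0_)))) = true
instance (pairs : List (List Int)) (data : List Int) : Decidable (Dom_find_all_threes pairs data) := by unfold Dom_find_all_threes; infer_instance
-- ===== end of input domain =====

-- B replaces A's per-pair set-union recomputation by an element→indices bucket index and
-- per-row intersection counters, building a union only for qualifying pairs (constant-factor speed-up).

-- ===== PORT A =====
def find_all_threes (pairs : List (List Int)) (data : List Int) : List (List Int) :=
  pairs.foldl (fun all_threes pair_1 =>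
    pairs.foldl (fun all_threes pair_2 =>
      let current := PySem.Set.union pair_1 pair_2
      if PySem.Set.len current == 3 then all_threes ++ [current] else all_threes)
      all_threes)
    []

-- ===== PORT B =====
def find_all_threes_alt (pairs : List (List Int)) (data : List Int) : List (List Int) :=
  let n : Int := PySem.List.len pairs
  let bucket : PySem.Dict Int (List Int) :=
    (PySem.List.enumerate pairs).foldl (fun d ip =>
      ip.2.foldl (fun d x => d.modify x [] (fun l => l ++ [ip.1])) d) PySem.Dict.empty
  (PySem.List.pyRange 0 n).foldl (fun all_threes i =>
    let p := PySem.List.pyGetD pairs i []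
    let row : PySem.Dict Int Int :=
      p.foldl (fun r x =>
        (bucket.getD x []).foldl (fun r j => r.modify j 0 (fun c => c + 1)) r) PySem.Dict.empty
    (PySem.List.pyRange 0 n).foldl (fun all_threes j =>
      if PySem.List.len p + PySem.List.len (PySem.List.pyGetD pairs j [])
           - row.getD j 0 == 3
      then all_threes ++ [PySem.Set.union p (PySem.List.pyGetD pairs j [])]
      else all_threes)
      all_threes)
    []

-- ===== PRECONDITION & SPEC =====
-- Pre_: the arguments are lists of Python SETS, so each inner list holds distinct elements
-- (the type-convention representation of set[int]); every input the Python A receives satisfies it.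
def Pre_find_all_threes (pairs : List (List Int)) (data : List Int) : Prop :=
  ∀ p ∈ pairs, p.Nodup
instance (pairs : List (List Int)) (data : List Int) : Decidable (Pre_find_all_threes pairs data) := by
  unfold Pre_find_all_threes; infer_instance
def pvWitness_find_all_threes : List (List Int) × List Int := ([[1, 2], [2, 3]], [])

def Spec_find_all_threes (pairs : List (List Int)) (data : List Int) (out : List (List Int)) : Prop :=
  out = find_all_threes_alt pairs data
instance (pairs : List (List Int)) (data : List Int) (out : List (List Int)) : Decidable (Spec_find_all_threes pairs data out) := by
  unfold Spec_find_all_threes; infer_instance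

-- ===== CLAIM (what is proved, stated in full; the proofs are below) =====
def Claim_equal_find_all_threes : Prop :=
  ∀ (pairs : List (List Int)) (data : List Int), Dom_find_all_threes pairs data →
    Pre_find_all_threes pairs data →
    Spec_find_all_threes pairs data (find_all_threes pairs data)

-- ===== LEMMAS AND PROOFS =====

-- named pieces of B's port (definitionally equal to the let-bound subterms of find_all_threes_alt)
def bucketOf (pairs : List (List Int)) : PySem.Dict Int (List Int) :=
  (PySem.List.enumerate pairs).foldl (fun d ip =>
    ip.2.foldl (fun d x => d.modify x [] (fun l => l ++ [ip.1])) d) PySem.Dict.empty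

def rowOf (bucket : PySem.Dict Int (List Int)) (p : List Int) : PySem.Dict Int Int :=
  p.foldl (fun r x =>
    (bucket.getD x []).foldl (fun r j => r.modify j 0 (fun c => c + 1)) r) PySem.Dict.empty

def innerB (pairs : List (List Int)) (p : List Int) (acc : List (List Int)) (j : Int) : List (List Int) :=
  if PySem.List.len p + PySem.List.len (PySem.List.pyGetD pairs j [])
       - (rowOf (bucketOf pairs) p).getD j 0 == 3
  then acc ++ [PySem.Set.union p (PySem.List.pyGetD pairs j [])]
  else acc

def innerA (p : List Int) (acc : List (List Int)) (q : List Int) : List (List Int) :=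
  if PySem.Set.len (PySem.Set.union p q) == 3 then acc ++ [PySem.Set.union p q] else acc

lemma filt_repl (p : List Int) (i x : Int) :
    List.map (fun q => q.2) (List.filter (fun q => q.1 == x) (p.map (fun y => (y, i))))
      = List.replicate (p.count x) i := by
  induction p with
  | nil => simp
  | cons a t ih =>
    by_cases h : a = x
    · subst h; simp_all [List.replicate_succ]
    · simp_all

lemma bucket_step_getD (p : List Int) (i : Int) (d : PySem.Dict Int (List Int)) (x : Int) :
    (p.foldl (fun d y => d.modify y [] (fun l => l ++ [i])) d).getD x []
      = d.getD x [] ++ List.replicate (p.count x) i := by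
  have h := PySem.Dict.getD_foldl_modify_append (p.map (fun y => (y, i))) d x
  rw [List.foldl_map] at h
  rw [h, filt_repl]

lemma bucket_count (pairs : List (List Int)) (s : Int) (d : PySem.Dict Int (List Int))
    (x j : Int) :
    (((PySem.List.enumerate pairs s).foldl (fun d ip =>
        ip.2.foldl (fun d y => d.modify y [] (fun l => l ++ [ip.1])) d) d).getD x []).count j
      = (d.getD x []).count j
        + ((PySem.List.enumerate pairs s).map
            (fun ip => if ip.1 = j then ip.2.count x else 0)).sum := by
  induction pairs generalizing s d with
  | nil => simp [PySem.List.enumerate_nil]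
  | cons p t ih =>
    rw [PySem.List.enumerate_cons]
    simp only [List.foldl_cons, List.map_cons, List.sum_cons]
    rw [ih, bucket_step_getD, List.count_append, List.count_replicate]
    by_cases hsj : s = j
    · subst hsj; simp; omega
    · simp [hsj]

lemma row_getD (p : List Int) (F : Int → List Int) (r : PySem.Dict Int Int) (j : Int) :
    ((p.foldl (fun r x =>
        (F x).foldl (fun r j' => r.modify j' 0 (fun c => c + 1)) r) r).getD j 0)
      = r.getD j 0 + (p.map (fun x => ((F x).count j : Int))).sum := by
  induction p generalizing r with
  | nil => simp
  | cons a t ih =>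
    simp only [List.foldl_cons, List.map_cons, List.sum_cons]
    rw [ih, PySem.Dict.getD_foldl_modify_add_one]
    ring

lemma countP_mem_comm (p q : List Int) (hp : p.Nodup) (hq : q.Nodup) :
    p.countP (fun x => decide (x ∈ q)) = q.countP (fun x => decide (x ∈ p)) := by
  have h1 : ∀ (a b : List Int), a.Nodup →
      a.countP (fun x => decide (x ∈ b)) = (a.toFinset ∩ b.toFinset).card := by
    intro a b ha
    rw [List.countP_eq_length_filter]
    have hnd : (a.filter (fun x => decide (x ∈ b))).Nodup := ha.filter _
    rw [← List.toFinset_card_of_nodup hnd]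
    congr 1
    ext y
    simp
  rw [h1 p q hp, h1 q p hq, Finset.inter_comm]

lemma sum_count_eq_countP (p q : List Int) (hq : q.Nodup) :
    (p.map (fun x => ((q.count x : Int)))).sum = (p.countP (fun x => decide (x ∈ q)) : Int) := by
  induction p with
  | nil => simp
  | cons a t ih =>
    simp only [List.map_cons, List.sum_cons, List.countP_cons, ih]
    by_cases h : a ∈ q
    · rw [List.count_eq_one_of_mem hq h]; simp [h]; ring
    · rw [List.count_eq_zero_of_not_mem h]; simp [h]

lemma union_len (p q : List Int) (hq : q.Nodup) :
    (PySem.Set.union p q).length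
      = p.length + (q.filter (fun y => !(PySem.Set.contains p y))).length := by
  rw [PySem.Set.union_eq_update, PySem.Set.update_eq_append_filter,
    PySem.Set.ofList_eq_self_of_nodup q hq, List.length_append]

lemma cond_eq (p q : List Int) (hp : p.Nodup) (hq : q.Nodup) :
    (PySem.Set.len (PySem.Set.union p q) == 3)
      = (PySem.List.len p + PySem.List.len q
          - (p.map (fun x => ((q.count x : Int)))).sum == 3) := by
  rw [sum_count_eq_countP p q hq, countP_mem_comm p q hp hq]
  have hc : (fun y => !(PySem.Set.contains p y)) = (fun y : Int => !(decide (y ∈ p))) := by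
    funext y
    by_cases h : y ∈ p <;> simp [h]
  have hq3 : q.countP (fun x => decide (x ∈ p))
      + (q.filter (fun y : Int => !(decide (y ∈ p)))).length = q.length := by
    rw [List.countP_eq_length_filter]
    exact (List.length_eq_length_filter_add (fun y : Int => decide (y ∈ p))).symm
  have hu := union_len p q hq
  rw [hc] at hu
  simp only [PySem.Set.len, PySem.List.len, hu]
  by_cases h3 : p.length + (q.filter (fun y : Int => !(decide (y ∈ p)))).length = 3
  · have h4 : (↑p.length + ↑q.length - (↑(q.countP (fun x => decide (x ∈ p))) : Int)) = 3 := by omega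
    simp [h4]
    omega
  · have h4 : ¬ ((↑p.length + ↑q.length - (↑(q.countP (fun x => decide (x ∈ p))) : Int)) = 3) := by omega
    simp [h4]
    omega

lemma sum_pick (l : List Int) (hl : l.Nodup) (j : Int) (hj : j ∈ l) (f : Int → Nat) :
    (l.map (fun i => if i = j then f i else 0)).sum = f j := by
  induction l with
  | nil => simp at hj
  | cons a t ih =>
    simp only [List.map_cons, List.sum_cons]
    rcases List.mem_cons.mp hj with h | h
    · have hz : (t.map (fun i => if i = j then f i else 0)).sum = 0 := by
        apply List.sum_eq_zero
        intro x hx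
        rcases List.mem_map.mp hx with ⟨i, hi, rfl⟩
        have : i ≠ j := by rintro rfl; exact (List.nodup_cons.mp hl).1 (h ▸ hi)
        simp [this]
      rw [hz, if_pos h.symm, ← h]; omega
    · have hna : a ≠ j := by rintro rfl; exact (List.nodup_cons.mp hl).1 h
      rw [ih (List.nodup_cons.mp hl).2 h]
      simp [hna]

lemma nodup_pyRange_zero (n : Nat) : (PySem.List.pyRange 0 (n : Int)).Nodup := by
  rw [PySem.List.pyRange_zero_natCast]
  exact (List.nodup_range).map (fun a b h => by exact_mod_cast h)

-- the row counter of B really is the per-index intersection count against pairs[j]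
lemma row_value (pairs : List (List Int)) (p : List Int) (j : Int)
    (h0 : 0 ≤ j) (h1 : j < (pairs.length : Int)) :
    (rowOf (bucketOf pairs) p).getD j 0
      = (p.map (fun x => (((PySem.List.pyGetD pairs j []).count x : Int)))).sum := by
  rw [rowOf, row_getD, PySem.Dict.getD_empty, zero_add]
  congr 1
  apply List.map_congr_left
  intro x _
  have hb := bucket_count pairs 0 PySem.Dict.empty x j
  rw [PySem.Dict.getD_empty, List.count_nil, Nat.zero_add] at hb
  rw [bucketOf, hb]
  rw [PySem.List.enumerate_eq_map_pyRange pairs ([] : List Int), List.map_map]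
  have hlen : PySem.List.len pairs = ((pairs.length : Nat) : Int) := rfl
  rw [hlen]
  have hpick := sum_pick (PySem.List.pyRange 0 ((pairs.length : Nat) : Int))
    (nodup_pyRange_zero pairs.length) j
    (PySem.List.mem_pyRange_one.mpr ⟨h0, h1⟩)
    (fun i => (PySem.List.pyGetD pairs i []).count x)
  simp only [Function.comp_def] at hpick ⊢
  rw [hpick]

-- B's inner loop over j equals A's inner loop over the pair-sets themselves
lemma inner_eq (pairs : List (List Int)) (p : List Int)
    (hpre : ∀ r ∈ pairs, r.Nodup) (hp : p.Nodup) (acc : List (List Int)) :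
    (PySem.List.pyRange 0 (PySem.List.len pairs)).foldl (innerB pairs p) acc
      = pairs.foldl (innerA p) acc := by
  have hstep : (PySem.List.pyRange 0 (PySem.List.len pairs)).foldl (innerB pairs p) acc
      = (PySem.List.pyRange 0 (PySem.List.len pairs)).foldl
          (fun acc j => innerA p acc (PySem.List.pyGetD pairs j [])) acc := by
    apply PySem.List.foldl_congr_mem
    intro acc' j hj
    obtain ⟨h0, h1⟩ := PySem.List.mem_pyRange_one.mp hj
    have h1' : j < (pairs.length : Int) := h1
    have hq : (PySem.List.pyGetD pairs j []).Nodup := by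
      rw [PySem.List.pyGetD_eq_getElem pairs [] h0 h1']
      exact hpre _ (List.getElem_mem _)
    rw [innerB, innerA, row_value pairs p j h0 h1', ← cond_eq p _ hp hq]
  rw [hstep]
  have := PySem.List.foldl_pyRange_pyGetD pairs [] (innerA p) acc (a := 0) le_rfl
  rw [this]
  simp

theorem find_all_threes_spec : Claim_equal_find_all_threes := by
  intro pairs data _ hpre
  unfold Spec_find_all_threes
  have hA : find_all_threes pairs data
      = pairs.foldl (fun acc p1 => pairs.foldl (innerA p1) acc) [] := rfl
  have hB : find_all_threes_alt pairs data
      = (PySem.List.pyRange 0 (PySem.List.len pairs)).foldl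
          (fun acc i => (PySem.List.pyRange 0 (PySem.List.len pairs)).foldl
            (innerB pairs (PySem.List.pyGetD pairs i [])) acc) [] := rfl
  rw [hA, hB]
  have hout := PySem.List.foldl_pyRange_pyGetD pairs []
    (fun acc p => (PySem.List.pyRange 0 (PySem.List.len pairs)).foldl (innerB pairs p) acc)
    [] (a := 0) le_rfl
  rw [hout]
  simp only [Int.toNat_zero, List.drop_zero]
  apply PySem.List.foldl_congr_mem
  intro acc p hpmem
  exact (inner_eq pairs p hpre (hpre p hpmem) acc).symm
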